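-- pv_equiv track=rewrite | github.com/Haeckerzz/sharad-length | streamlit_app.py | minimal_waste_bar_cut
-- ===== SOURCE A (Python) =====
-- def minimal_waste_bar_cut(stock_length, required_lengths):
--     required_lengths = sorted(required_lengths, reverse=True)
--     bars = []
--     while required_lengths:
--         bar = []
--         remaining = stock_length
--         to_remove = []
--         for i, length in enumerate(required_lengths):
--             if length <= remaining:
--                 bar.append(length)
--                 remaining -= length
--                 to_remove.append(i)
--         bars.append(bar)
--         for i in reversed(to_remove):
--             required_lengths.pop(i)
--     return bars
-- ===== SOURCE B (Python) =====
-- def minimal_waste_bar_cut(stock_length, required_lengths):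
--     # First-fit decreasing: one pass over the sorted items; each item goes into
--     # the first already-open bar with enough remaining capacity, else a new bar.
--     bars = []
--     caps = []
--     for x in sorted(required_lengths, reverse=True):
--         for j, c in enumerate(caps):
--             if x <= c:
--                 bars[j].append(x)
--                 caps[j] = c - x
--                 break
--         else:
--             bars.append([x])
--             caps.append(stock_length - x)
--     return bars
-- ===== Notes on version B (the rewrite author's own statement) =====
-- stated objective: alternative
-- what changed: B is first-fit decreasing: a single pass over the sorted items that places each item into the first open bar with enough remaining capacity (opening a new bar otherwise), instead of A's outer while loop that re-scans the remaining list once per bar and pops picked indices; Pre_ excludes inputs with a length exceeding stock_length because A loops forever there.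
import Mathlib
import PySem

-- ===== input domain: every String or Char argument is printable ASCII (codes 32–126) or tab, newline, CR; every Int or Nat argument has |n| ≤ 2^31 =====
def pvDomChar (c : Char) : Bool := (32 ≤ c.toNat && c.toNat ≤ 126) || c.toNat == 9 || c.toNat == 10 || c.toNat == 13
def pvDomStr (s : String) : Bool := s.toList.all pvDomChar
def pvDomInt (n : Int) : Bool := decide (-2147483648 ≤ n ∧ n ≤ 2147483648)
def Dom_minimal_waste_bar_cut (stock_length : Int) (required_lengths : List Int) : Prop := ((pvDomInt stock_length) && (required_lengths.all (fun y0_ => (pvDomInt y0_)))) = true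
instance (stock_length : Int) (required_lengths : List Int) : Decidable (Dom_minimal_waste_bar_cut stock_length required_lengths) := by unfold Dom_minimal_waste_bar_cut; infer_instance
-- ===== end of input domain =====

-- B is first-fit decreasing (one pass placing each sorted item into the first bar
-- with room) instead of A's pass-per-bar scan with index pops — alternative algorithm,
-- proved equal wherever A terminates (Pre_: every length fits a fresh bar).

-- ===== PORT A =====
-- one inner 'for i, length in enumerate(required_lengths)' pass: state (bar, remaining, to_remove)
def pvPassA (stock_length : Int) (xs : List Int) : List Int × Int × List Int :=
  (PySem.List.enumerate xs).foldl
    (fun st p => if p.2 ≤ st.2.1 then (st.1 ++ [p.2], st.2.1 - p.2, st.2.2 ++ [p.1]) else st)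
    ([], stock_length, [])

-- 'for i in reversed(to_remove): required_lengths.pop(i)'
def pvPopRev (xs : List Int) (to_remove : List Int) : List Int :=
  to_remove.reverse.foldl (fun l i => ((PySem.List.pop? l i).map Prod.snd).getD l) xs

-- the 'while required_lengths:' loop; fuel = initial length (inside Pre_ each pass
-- removes at least one element, so this fuel is never exhausted there)
def pvLoopA (stock_length : Int) : Nat → List Int → List (List Int) → List (List Int)
  | 0, _, bars => bars
  | fuel + 1, req, bars =>
    if req = [] then bars
    else
      let s := pvPassA stock_length req
      pvLoopA stock_length fuel (pvPopRev req s.2.2) (bars ++ [s.1])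

def minimal_waste_bar_cut (stock_length : Int) (required_lengths : List Int) : List (List Int) :=
  let req := PySem.List.sorted required_lengths (fun x => x) true
  pvLoopA stock_length req.length req []

-- ===== PORT B =====
-- the inner 'for j, c in enumerate(caps): … break / else: open a new bar',
-- with bars and capacities kept paired
def pvPlace (stock_length : Int) : List (List Int × Int) → Int → List (List Int × Int)
  | [], x => [([x], stock_length - x)]
  | (b, c) :: t, x => if x ≤ c then (b ++ [x], c - x) :: t else (b, c) :: pvPlace stock_length t x

def minimal_waste_bar_cut_alt (stock_length : Int) (required_lengths : List Int) : List (List Int) :=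
  (((PySem.List.sorted required_lengths (fun x => x) true).foldl (pvPlace stock_length) []).map Prod.fst)

-- ===== PRECONDITION & SPEC =====
-- Pre_ excludes exactly the inputs on which A never returns: if some required length
-- exceeds stock_length, that item is never picked and A's while loop runs forever.
def Pre_minimal_waste_bar_cut (stock_length : Int) (required_lengths : List Int) : Prop :=
  ∀ x ∈ required_lengths, x ≤ stock_length
instance (stock_length : Int) (required_lengths : List Int) : Decidable (Pre_minimal_waste_bar_cut stock_length required_lengths) := by unfold Pre_minimal_waste_bar_cut; infer_instance
def pvWitness_minimal_waste_bar_cut : Int × List Int := (10, [4, 7, 3, 5])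
def Spec_minimal_waste_bar_cut (stock_length : Int) (required_lengths : List Int) (out : List (List Int)) : Prop := out = minimal_waste_bar_cut_alt stock_length required_lengths
instance (stock_length : Int) (required_lengths : List Int) (out : List (List Int)) : Decidable (Spec_minimal_waste_bar_cut stock_length required_lengths out) := by unfold Spec_minimal_waste_bar_cut; infer_instance

-- ===== CLAIM =====
def Claim_equal_minimal_waste_bar_cut : Prop := ∀ (stock_length : Int) (required_lengths : List Int), Dom_minimal_waste_bar_cut stock_length required_lengths → Pre_minimal_waste_bar_cut stock_length required_lengths → Spec_minimal_waste_bar_cut stock_length required_lengths (minimal_waste_bar_cut stock_length required_lengths)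

-- ===== LEMMAS AND PROOFS =====

-- reference recursive partition for one of A's passes: (picked, kept, final remaining)
def pvFillRec : Int → List Int → List Int × List Int × Int
  | rem, [] => ([], [], rem)
  | rem, x :: xs =>
    if x ≤ rem then
      let t := pvFillRec (rem - x) xs
      (x :: t.1, t.2.1, t.2.2)
    else
      let t := pvFillRec rem xs
      (t.1, x :: t.2.1, t.2.2)

-- indices (from offset n) that A's scan picks
def pvIdxs : Int → List Int → Int → List Int
  | _, [], _ => []
  | rem, x :: xs, n => if x ≤ rem then n :: pvIdxs (rem - x) xs (n + 1) else pvIdxs rem xs (n + 1)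

theorem pvIdxs_shift (xs : List Int) : ∀ (rem n : Int),
    pvIdxs rem xs (n + 1) = (pvIdxs rem xs n).map (· + 1) := by
  induction xs with
  | nil => intro rem n; simp [pvIdxs]
  | cons x xs ih => intro rem n; by_cases h : x ≤ rem <;> simp [pvIdxs, h, ih]

theorem pvIdxs_nonneg (xs : List Int) : ∀ (rem n : Int), 0 ≤ n →
    ∀ i ∈ pvIdxs rem xs n, 0 ≤ i := by
  induction xs with
  | nil => intro rem n _ i hi; simp [pvIdxs] at hi
  | cons x xs ih =>
    intro rem n hn i hi
    by_cases h : x ≤ rem <;> simp [pvIdxs, h] at hi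
    · rcases hi with rfl | hi
      · exact hn
      · exact ih _ _ (by omega) _ hi
    · exact ih _ _ (by omega) _ hi

theorem pvPassA_foldl (xs : List Int) : ∀ (n : Int) (b : List Int) (rem : Int) (tr : List Int),
    (PySem.List.enumerate xs n).foldl
      (fun st p => if p.2 ≤ st.2.1 then (st.1 ++ [p.2], st.2.1 - p.2, st.2.2 ++ [p.1]) else st)
      (b, rem, tr)
    = (b ++ (pvFillRec rem xs).1, (pvFillRec rem xs).2.2, tr ++ pvIdxs rem xs n) := by
  induction xs with
  | nil => intro n b rem tr; simp [pvFillRec, pvIdxs, PySem.List.enumerate_nil]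
  | cons x xs ih =>
    intro n b rem tr
    rw [PySem.List.enumerate_cons]
    by_cases h : x ≤ rem <;> simp [pvFillRec, pvIdxs, h, ih]

-- pop at a shifted nonnegative index commutes with cons
theorem pvPop_shift (x : Int) (xs : List Int) (i : Int) (hi : 0 ≤ i) :
    ((PySem.List.pop? (x :: xs) (i + 1)).map Prod.snd).getD (x :: xs)
    = x :: ((PySem.List.pop? xs i).map Prod.snd).getD xs := by
  by_cases h : i < (xs.length : Int)
  · have hnat : i.toNat < xs.length := by omega
    have h1 : i = (i.toNat : Int) := by omega
    have h2 : i + 1 = ((i.toNat + 1 : Nat) : Int) := by omega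
    have e2 : PySem.List.pop? xs i = some (xs[i.toNat]'hnat, xs.eraseIdx i.toNat) := by
      conv_lhs => rw [h1]
      exact PySem.List.pop?_natCast xs i.toNat hnat
    have e1 : PySem.List.pop? (x :: xs) (i + 1)
        = some ((x :: xs)[i.toNat + 1]'(by simpa using hnat), (x :: xs).eraseIdx (i.toNat + 1)) := by
      conv_lhs => rw [h2]
      exact PySem.List.pop?_natCast (x :: xs) (i.toNat + 1) (by simpa using hnat)
    rw [e1, e2]
    simp
  · have e1 : PySem.List.pop? (x :: xs) (i + 1) = none := by
      simp only [PySem.List.pop?, PySem.List.pyIdx?]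
      rw [if_pos (by omega), if_neg (by simp; omega)]
      rfl
    have e2 : PySem.List.pop? xs i = none := by
      simp only [PySem.List.pop?, PySem.List.pyIdx?]
      rw [if_pos hi, if_neg (by omega)]
      rfl
    simp [e1, e2]

theorem pvPopFold_shift (l : List Int) : ∀ (x : Int) (xs : List Int), (∀ i ∈ l, 0 ≤ i) →
    (l.map (· + 1)).foldl (fun t i => ((PySem.List.pop? t i).map Prod.snd).getD t) (x :: xs)
    = x :: l.foldl (fun t i => ((PySem.List.pop? t i).map Prod.snd).getD t) xs := by
  induction l with
  | nil => intro x xs _; simp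
  | cons i l ih =>
    intro x xs hpos
    simp only [List.map_cons, List.foldl_cons]
    rw [pvPop_shift x xs i (hpos i (by simp))]
    exact ih x _ (fun j hj => hpos j (by simp [hj]))

theorem pvPopRev_idxs (xs : List Int) : ∀ (rem : Int),
    pvPopRev xs (pvIdxs rem xs 0) = (pvFillRec rem xs).2.1 := by
  induction xs with
  | nil => intro rem; simp [pvPopRev, pvIdxs, pvFillRec]
  | cons x xs ih =>
    intro rem
    by_cases h : x ≤ rem
    · simp only [pvPopRev, pvIdxs, if_pos h, pvFillRec]
      rw [show (0 : Int) + 1 = 0 + 1 by rfl, pvIdxs_shift]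
      rw [List.reverse_cons, show ((pvIdxs (rem - x) xs 0).map (· + 1)).reverse
            = (pvIdxs (rem - x) xs 0).reverse.map (· + 1) by simp]
      rw [List.foldl_append,
          pvPopFold_shift _ x xs (fun i hi => pvIdxs_nonneg xs (rem - x) 0 le_rfl i (by simpa using hi))]
      have := ih (rem - x)
      simp only [pvPopRev] at this
      simp [this, PySem.List.pop?_zero_cons]
    · simp only [pvPopRev, pvIdxs, if_neg h, pvFillRec]
      rw [show (0 : Int) + 1 = 0 + 1 by rfl, pvIdxs_shift]
      rw [show ((pvIdxs rem xs 0).map (· + 1)).reverse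
            = (pvIdxs rem xs 0).reverse.map (· + 1) by simp]
      rw [pvPopFold_shift _ x xs (fun i hi => pvIdxs_nonneg xs rem 0 le_rfl i (by simpa using hi))]
      have := ih rem
      simp only [pvPopRev] at this
      simp [this]

-- kept items are among the scanned items
theorem pvFillRec_kept_mem (xs : List Int) : ∀ (rem : Int),
    ∀ y ∈ (pvFillRec rem xs).2.1, y ∈ xs := by
  induction xs with
  | nil => intro rem y hy; simp [pvFillRec] at hy
  | cons x xs ih =>
    intro rem y hy
    by_cases h : x ≤ rem <;> simp [pvFillRec, h] at hy
    · exact List.mem_cons_of_mem _ (ih _ _ hy)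
    · rcases hy with rfl | hy
      · exact List.mem_cons_self
      · exact List.mem_cons_of_mem _ (ih _ _ hy)

theorem pvFillRec_kept_len (xs : List Int) : ∀ (rem : Int),
    (pvFillRec rem xs).2.1.length ≤ xs.length := by
  induction xs with
  | nil => intro rem; simp [pvFillRec]
  | cons x xs ih =>
    intro rem
    by_cases h : x ≤ rem <;> simp [pvFillRec, h]
    · exact Nat.le_succ_of_le (ih _)
    · exact ih _

-- first-fit into a state whose first bar has capacity c: the items the greedy
-- scan of capacity c picks go to that bar, the rest are first-fitted into the tail
theorem pvFFD_cons (stock : Int) (xs : List Int) :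
    ∀ (b : List Int) (c : Int) (t : List (List Int × Int)),
    xs.foldl (pvPlace stock) ((b, c) :: t)
    = (b ++ (pvFillRec c xs).1, (pvFillRec c xs).2.2) :: (pvFillRec c xs).2.1.foldl (pvPlace stock) t := by
  induction xs with
  | nil => intro b c t; simp [pvFillRec]
  | cons x xs ih =>
    intro b c t
    by_cases h : x ≤ c
    · simp only [List.foldl_cons, pvPlace, if_pos h, pvFillRec, ih]
      simp
    · simp only [List.foldl_cons, pvPlace, if_neg h, pvFillRec, ih]

-- main invariant: A's fueled loop = first-fit on the remaining items
theorem pvLoopA_ffd (stock : Int) : ∀ (fuel : Nat) (xs : List Int) (bars : List (List Int)),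
    (∀ x ∈ xs, x ≤ stock) → xs.length ≤ fuel →
    pvLoopA stock fuel xs bars = bars ++ (xs.foldl (pvPlace stock) []).map Prod.fst := by
  intro fuel
  induction fuel with
  | zero =>
    intro xs bars _ hlen
    have : xs = [] := List.length_eq_zero_iff.mp (Nat.le_zero.mp hlen)
    subst this; simp [pvLoopA]
  | succ fuel ih =>
    intro xs bars hle hlen
    match xs with
    | [] => simp [pvLoopA]
    | x :: xs' =>
      have hx : x ≤ stock := hle x (by simp)
      simp only [pvLoopA, if_neg (List.cons_ne_nil x xs')]
      have hA : pvPassA stock (x :: xs')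
          = ((pvFillRec stock (x :: xs')).1, (pvFillRec stock (x :: xs')).2.2, pvIdxs stock (x :: xs') 0) := by
        simpa using pvPassA_foldl (x :: xs') 0 [] stock []
      rw [hA]
      simp only
      rw [pvPopRev_idxs (x :: xs') stock]
      have hfill : pvFillRec stock (x :: xs')
          = (x :: (pvFillRec (stock - x) xs').1, (pvFillRec (stock - x) xs').2.1, (pvFillRec (stock - x) xs').2.2) := by
        simp [pvFillRec, hx]
      have hkmem : ∀ y ∈ (pvFillRec stock (x :: xs')).2.1, y ≤ stock := fun y hy =>
        hle y (pvFillRec_kept_mem (x :: xs') stock y hy)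
      have hklen : (pvFillRec stock (x :: xs')).2.1.length ≤ fuel := by
        have := pvFillRec_kept_len xs' (stock - x)
        rw [hfill]; simp only [List.length_cons] at hlen; simpa using Nat.le_trans this (by omega)
      rw [ih _ _ hkmem hklen]
      have hrhs : ((x :: xs').foldl (pvPlace stock) []).map Prod.fst
          = (pvFillRec stock (x :: xs')).1 :: ((pvFillRec stock (x :: xs')).2.1.foldl (pvPlace stock) []).map Prod.fst := by
        simp only [List.foldl_cons, pvPlace]
        rw [pvFFD_cons stock xs' [x] (stock - x) []]
        rw [hfill]
        simp
      rw [hrhs]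
      simp

-- ===== VERDICT =====
theorem minimal_waste_bar_cut_spec : Claim_equal_minimal_waste_bar_cut := by
  intro stock req _ hpre
  unfold Spec_minimal_waste_bar_cut minimal_waste_bar_cut minimal_waste_bar_cut_alt
  apply pvLoopA_ffd stock _ _ []
  · intro x hx
    exact hpre x ((PySem.List.mem_sorted _ _ _ _).mp hx)
  · exact le_rfl
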